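-- pv_equiv track=rewrite | github.com/Leoberium/BA | Chapter4/BA4B.py | generate_dna
-- ===== SOURCE A (Python) =====
-- aa_to_dna = {'F': ['TTT', 'TTC'],
--              'L': ['TTA', 'TTG', 'CTT', 'CTC', 'CTA', 'CTG'],
--              'S': ['TCT', 'TCC', 'TCA', 'TCG', 'AGT', 'AGC'],
--              'Y': ['TAT', 'TAC'],
--              'C': ['TGT', 'TGC'],
--              'W': ['TGG'],
--              'P': ['CCT', 'CCC', 'CCA', 'CCG'],
--              'H': ['CAT', 'CAC'],
--              'Q': ['CAA', 'CAG'],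
--              'R': ['CGT', 'CGC', 'CGA', 'CGG', 'AGA', 'AGG'],
--              'I': ['ATT', 'ATC', 'ATA'],
--              'M': ['ATG'],
--              'T': ['ACT', 'ACC', 'ACA', 'ACG'],
--              'N': ['AAT', 'AAC'],
--              'K': ['AAA', 'AAG'],
--              'V': ['GTT', 'GTC', 'GTA', 'GTG'],
--              'A': ['GCT', 'GCC', 'GCA', 'GCG'],
--              'D': ['GAT', 'GAC'],
--              'E': ['GAA', 'GAG'],
--              'G': ['GGT', 'GGC', 'GGA', 'GGG']
-- }
--
-- def generate_dna(peptide):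
--     if len(peptide) == 1:
--         for codon in aa_to_dna[peptide]:
--             yield codon
--     else:
--         prefix = peptide[:-1]
--         suffix = peptide[-1]
--         for codon in aa_to_dna[suffix]:
--             for p in generate_dna(prefix):
--                 yield p + codon
-- ===== SOURCE B (Python) =====
-- # B: derive the codon table from the standard genetic code and enumerate the
-- # product by mixed-radix index decoding instead of A's recursive generator.
-- _BASES = 'TCAG'
-- _AAS = 'FFLLSSSSYY**CC*WLLLLPPPPHHQQRRRRIIIMTTTTNNKKSSRRVVVVAAAADDEEGGGG'
--
-- _codons = [b1 + b2 + b3 for b1 in _BASES for b2 in _BASES for b3 in _BASES]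
-- _table = {}
-- for _codon, _aa in zip(_codons, _AAS):
--     if _aa != '*':
--         _table.setdefault(_aa, []).append(_codon)
--
--
-- def generate_dna(peptide):
--     codon_lists = [_table[aa] for aa in peptide]
--     total = 1
--     for cl in codon_lists:
--         total *= len(cl)
--     out = []
--     for k in range(total):
--         r = k
--         s = ''
--         for cl in codon_lists:
--             r, i = divmod(r, len(cl))
--             s += cl[i]
--         out.append(s)
--     return out
-- ===== Notes on version B (the rewrite author's own statement) =====
-- stated objective: alternative
-- what changed: B derives the codon table from the standard genetic code (64 codons zipped with the amino-acid string) instead of a hand-written dict, and replaces A's recursive generator with a mixed-radix index decoding: it computes the product of the codon-list lengths and decodes each index k into one codon string via repeated divmod.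
import Mathlib
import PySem

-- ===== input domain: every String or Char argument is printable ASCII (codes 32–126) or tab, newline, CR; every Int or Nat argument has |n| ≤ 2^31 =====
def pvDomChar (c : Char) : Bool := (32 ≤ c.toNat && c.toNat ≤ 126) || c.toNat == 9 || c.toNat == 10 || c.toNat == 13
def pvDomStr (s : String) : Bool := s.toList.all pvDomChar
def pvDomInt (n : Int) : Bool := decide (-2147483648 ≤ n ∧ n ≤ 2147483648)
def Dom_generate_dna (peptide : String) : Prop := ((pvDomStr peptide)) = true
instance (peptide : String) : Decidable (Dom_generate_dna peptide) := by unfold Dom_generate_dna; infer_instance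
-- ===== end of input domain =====

-- B derives the codon table from the standard genetic code and enumerates the codon-string
-- product by mixed-radix index decoding instead of A's recursion (objective: alternative, same cost).

-- ===== PORT A =====
-- A's module-level dict aa_to_dna, written out literally
def aaToDna : PySem.Dict String (List String) := PySem.Dict.ofList
  [ ("F", ["TTT", "TTC"]),
    ("L", ["TTA", "TTG", "CTT", "CTC", "CTA", "CTG"]),
    ("S", ["TCT", "TCC", "TCA", "TCG", "AGT", "AGC"]),
    ("Y", ["TAT", "TAC"]),
    ("C", ["TGT", "TGC"]),
    ("W", ["TGG"]),
    ("P", ["CCT", "CCC", "CCA", "CCG"]),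
    ("H", ["CAT", "CAC"]),
    ("Q", ["CAA", "CAG"]),
    ("R", ["CGT", "CGC", "CGA", "CGG", "AGA", "AGG"]),
    ("I", ["ATT", "ATC", "ATA"]),
    ("M", ["ATG"]),
    ("T", ["ACT", "ACC", "ACA", "ACG"]),
    ("N", ["AAT", "AAC"]),
    ("K", ["AAA", "AAG"]),
    ("V", ["GTT", "GTC", "GTA", "GTG"]),
    ("A", ["GCT", "GCC", "GCA", "GCG"]),
    ("D", ["GAT", "GAC"]),
    ("E", ["GAA", "GAG"]),
    ("G", ["GGT", "GGC", "GGA", "GGG"]) ]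

-- A's recursion over the peptide (a KeyError lookup is getD []; Pre_ excludes those inputs)
def generate_dna_core (cs : List Char) : List String :=
  if cs.length = 1 then
    (PySem.Dict.get? aaToDna (String.mk cs)).getD []
  else
    match h : PySem.List.pyGet? cs (-1) with
    | none => []   -- peptide[-1] raises IndexError on the empty peptide (excluded by Pre_)
    | some suffix =>
      ((PySem.Dict.get? aaToDna (String.mk [suffix])).getD []).foldl
        (fun acc codon => acc ++ (generate_dna_core cs.dropLast).map (fun p => p ++ codon)) []
termination_by cs.length
decreasing_by
  cases cs with
  | nil => simp [PySem.List.pyGet?] at h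
  | cons a as => simp [List.length_dropLast]

def generate_dna (peptide : String) : List String :=
  generate_dna_core peptide.toList

-- ===== PORT B =====
-- Source B module level: the codon table built from the standard genetic code
def gdBases : List Char := ['T', 'C', 'A', 'G']
def gdAAs : String := "FFLLSSSSYY**CC*WLLLLPPPPHHQQRRRRIIIMTTTTNNKKSSRRVVVVAAAADDEEGGGG"
def gdCodons : List String :=
  gdBases.flatMap (fun b1 => gdBases.flatMap (fun b2 => gdBases.map (fun b3 => String.mk [b1, b2, b3])))
-- table.setdefault(aa, []).append(codon): overwrite keeps position, new keys append — exactly Dict.insert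
def gdTable : PySem.Dict String (List String) :=
  (gdCodons.zip gdAAs.toList).foldl
    (fun t p =>
      if p.2 ≠ '*' then
        PySem.Dict.insert t (String.mk [p.2]) ((PySem.Dict.getD t (String.mk [p.2]) []) ++ [p.1])
      else t)
    PySem.Dict.empty

-- total = 1; for cl in codon_lists: total *= len(cl)
def gdTotal (lists : List (List String)) : Nat :=
  lists.foldl (fun t cl => t * cl.length) 1
-- inner loop of Source B: r, i = divmod(r, len(cl)); s += cl[i]  (cl[i] with 0 ≤ i < len is exactly getD)
def gdStep (p : Nat × String) (cl : List String) : Nat × String :=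
  (p.1 / cl.length, p.2 ++ cl.getD (p.1 % cl.length) "")
def gdBuild (lists : List (List String)) (k : Nat) : String :=
  (lists.foldl gdStep (k, "")).2

def generate_dna_alt (peptide : String) : List String :=
  let lists := peptide.toList.map (fun aa => (PySem.Dict.get? gdTable (String.mk [aa])).getD [])
  (List.range (gdTotal lists)).map (gdBuild lists)

-- ===== PRECONDITION & SPEC =====
-- Pre_ excludes the empty peptide (A raises IndexError) and peptides containing a character
-- that is not one of the 20 amino-acid letters (A raises KeyError).
def Pre_generate_dna (peptide : String) : Prop :=
  peptide.toList ≠ [] ∧ peptide.toList.all (fun c => (['F','L','S','Y','C','W','P','H','Q','R','I','M','T','N','K','V','A','D','E','G'] : List Char).contains c) = true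
instance (peptide : String) : Decidable (Pre_generate_dna peptide) := by
  unfold Pre_generate_dna; infer_instance

def pvWitness_generate_dna : String := "MF"

def Spec_generate_dna (peptide : String) (out : List String) : Prop := out = generate_dna_alt peptide
instance (peptide : String) (out : List String) : Decidable (Spec_generate_dna peptide out) := by unfold Spec_generate_dna; infer_instance

-- ===== CLAIM (what is proved, stated in full; the proofs are below) =====
def Claim_equal_generate_dna : Prop := ∀ (peptide : String), Dom_generate_dna peptide → Pre_generate_dna peptide → Spec_generate_dna peptide (generate_dna peptide)

-- ===== LEMMAS AND PROOFS =====

-- codon list of one residue, as A looks it up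
def pvCodons (aa : Char) : List String :=
  (PySem.Dict.get? aaToDna (String.mk [aa])).getD []

-- the step of the abstract left-to-right product fold (A's result, after core_eq_fold)
def pvStep (acc : List String) (aa : Char) : List String :=
  (pvCodons aa).flatMap (fun c => acc.map (fun s => s ++ c))

-- same step over a codon list directly
def pvStepL (acc : List String) (cl : List String) : List String :=
  cl.flatMap (fun c => acc.map (fun s => s ++ c))

lemma flatten_map_singleton {α : Type} (l : List α) : (List.map (fun c => [c]) l).flatten = l := by
  induction l with
  | nil => rfl
  | cons a as ih => simp [ih]

lemma genA_singleton (x : Char) : generate_dna_core [x] = pvCodons x := by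
  rw [generate_dna_core]
  simp [pvCodons]

lemma genA_snoc (cs : List Char) (x : Char) (h : cs ≠ []) :
    generate_dna_core (cs ++ [x]) =
      (pvCodons x).flatMap (fun c => (generate_dna_core cs).map (fun p => p ++ c)) := by
  rw [generate_dna_core]
  have hlen : ¬ (cs ++ [x]).length = 1 := by
    cases cs with
    | nil => exact absurd rfl h
    | cons a as => simp
  rw [if_neg hlen, PySem.List.pyGet?_neg_one_append_singleton]
  simp only [List.dropLast_concat, PySem.List.foldl_append_eq_flatMap, List.nil_append]
  rfl

lemma core_eq_fold (cs : List Char) (h : cs ≠ []) :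
    generate_dna_core cs = cs.foldl pvStep [""] := by
  induction cs using List.reverseRecOn with
  | nil => exact absurd rfl h
  | append_singleton cs x ih =>
    rw [List.foldl_append]
    cases hcs : cs with
    | nil =>
      simp only [List.nil_append, List.foldl_nil]
      rw [genA_singleton]
      simp [pvStep, List.flatMap, flatten_map_singleton]
    | cons a as =>
      rw [← hcs]
      have hne : cs ≠ [] := by simp [hcs]
      rw [genA_snoc cs x hne, ih hne]
      rfl

-- B's table agrees with A's table on the 20 amino-acid letters
set_option maxRecDepth 12000 in
lemma tableB_eq : ∀ c ∈ (['F','L','S','Y','C','W','P','H','Q','R','I','M','T','N','K','V','A','D','E','G'] : List Char),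
    (PySem.Dict.get? gdTable (String.mk [c])).getD [] = pvCodons c := by
  intro c hc
  simp only [List.mem_cons, List.not_mem_nil, or_false] at hc
  rcases hc with rfl | rfl | rfl | rfl | rfl | rfl | rfl | rfl | rfl | rfl | rfl | rfl | rfl | rfl | rfl | rfl | rfl | rfl | rfl | rfl <;> decide

lemma gdTotal_foldl (L : List (List String)) (a : Nat) :
    L.foldl (fun t cl => t * cl.length) a = a * gdTotal L := by
  induction L generalizing a with
  | nil => simp [gdTotal]
  | cons cl L ih =>
    simp only [List.foldl_cons, gdTotal] at *
    rw [ih, ih (1 * cl.length)]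
    ring

lemma gdTotal_cons (cl : List String) (L : List (List String)) :
    gdTotal (cl :: L) = cl.length * gdTotal L := by
  show List.foldl _ (1 * cl.length) L = _
  rw [gdTotal_foldl]; ring

lemma gdTotal_snoc (L : List (List String)) (cl : List String) :
    gdTotal (L ++ [cl]) = gdTotal L * cl.length := by
  unfold gdTotal
  rw [List.foldl_append]
  rfl

lemma gdFold_snd (L : List (List String)) (k : Nat) (s : String) :
    (L.foldl gdStep (k, s)).2 = s ++ gdBuild L k := by
  induction L generalizing k s with
  | nil => simp [gdBuild]
  | cons cl L ih =>
    simp only [gdBuild, List.foldl_cons, gdStep]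
    rw [ih, ih]
    simp [String.append_assoc]

lemma gdFold_fst (L : List (List String)) (k : Nat) (s : String) :
    (L.foldl gdStep (k, s)).1 = k / gdTotal L := by
  induction L generalizing k s with
  | nil => simp [gdTotal]
  | cons cl L ih =>
    simp only [List.foldl_cons, gdStep]
    rw [ih, gdTotal_cons, Nat.div_div_eq_div_mul]

lemma gdBuild_cons (cl : List String) (L : List (List String)) (k : Nat) :
    gdBuild (cl :: L) k = cl.getD (k % cl.length) "" ++ gdBuild L (k / cl.length) := by
  show (List.foldl gdStep (gdStep (k, "") cl) L).2 = _
  simp only [gdStep]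
  rw [gdFold_snd]
  simp [gdBuild]

lemma gdBuild_periodic (L : List (List String)) (j k : Nat) :
    gdBuild L (j * gdTotal L + k) = gdBuild L k := by
  induction L generalizing j k with
  | nil =>
    simp [gdBuild]
  | cons cl L ih =>
    rcases Nat.eq_zero_or_pos cl.length with h0 | hpos
    · rw [gdTotal_cons, h0]
      simp
    · rw [gdTotal_cons, gdBuild_cons, gdBuild_cons]
      have harg : j * (cl.length * gdTotal L) + k = k + (j * gdTotal L) * cl.length := by ring
      rw [harg, Nat.add_mul_mod_self_right, Nat.add_mul_div_right _ _ hpos,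
        Nat.add_comm (k / cl.length) (j * gdTotal L), ih]

lemma gdBuild_snoc (L : List (List String)) (cl : List String) (m : Nat) :
    gdBuild (L ++ [cl]) m = gdBuild L m ++ cl.getD ((m / gdTotal L) % cl.length) "" := by
  simp only [gdBuild, List.foldl_append, List.foldl_cons, List.foldl_nil, gdStep]
  rw [gdFold_snd, gdFold_fst]

lemma range_mul (T n : Nat) :
    List.range (T * n) = (List.range n).flatMap (fun j => (List.range T).map (fun k => j * T + k)) := by
  induction n with
  | zero => simp
  | succ n ih =>
    rw [Nat.mul_succ, List.range_add, ih, List.range_succ, List.flatMap_append]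
    simp [Nat.mul_comm]

lemma flatMap_getD_range (cl : List String) (g : String → List String) :
    cl.flatMap g = (List.range cl.length).flatMap (fun j => g (cl.getD j "")) := by
  induction cl with
  | nil => simp
  | cons c cl ih =>
    rw [List.flatMap_cons, List.length_cons, List.range_succ_eq_map, List.flatMap_cons,
        List.flatMap_map]
    simp only [List.getD_cons_zero, List.getD_cons_succ]
    rw [ih]

lemma enum_eq (L : List (List String)) :
    (List.range (gdTotal L)).map (gdBuild L) = L.foldl pvStepL [""] := by
  induction L using List.reverseRecOn with
  | nil => decide
  | append_singleton L cl ih =>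
    rw [List.foldl_append, List.foldl_cons, List.foldl_nil, ← ih]
    rcases Nat.eq_zero_or_pos (gdTotal L) with hT0 | hpos
    · rw [gdTotal_snoc, hT0, Nat.zero_mul]
      simp [pvStepL]
    · rw [gdTotal_snoc, range_mul, List.map_flatMap]
      simp only [pvStepL]
      rw [flatMap_getD_range cl (fun c => (List.map (gdBuild L) (List.range (gdTotal L))).map (fun s => s ++ c))]
      apply List.flatMap_congr
      intro j hj
      rw [List.map_map, List.map_map]
      apply List.map_congr_left
      intro k hk
      have hjn : j < cl.length := List.mem_range.mp hj
      have hkT : k < gdTotal L := List.mem_range.mp hk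
      simp only [Function.comp]
      rw [gdBuild_snoc]
      have hdiv : (j * gdTotal L + k) / gdTotal L = j := by
        rw [Nat.add_comm, Nat.add_mul_div_right _ _ hpos, Nat.div_eq_of_lt hkT, Nat.zero_add]
      rw [hdiv, Nat.mod_eq_of_lt hjn, gdBuild_periodic]

lemma pre_all {cs : List Char}
    (h : cs.all (fun c => (['F','L','S','Y','C','W','P','H','Q','R','I','M','T','N','K','V','A','D','E','G'] : List Char).contains c) = true) :
    ∀ c ∈ cs, (PySem.Dict.get? gdTable (String.mk [c])).getD [] = pvCodons c := by
  intro c hc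
  have := List.all_eq_true.mp h c hc
  exact tableB_eq c (by simpa [List.contains_iff_mem] using this)

-- ===== VERDICT (by name: the statement is the Claim_ definition above) =====
theorem generate_dna_spec : Claim_equal_generate_dna := by
  intro peptide _ hpre
  unfold Spec_generate_dna generate_dna generate_dna_alt
  rw [core_eq_fold peptide.toList hpre.1]
  rw [enum_eq, List.foldl_map]
  exact PySem.List.foldl_congr_mem _ _ _ [""] (fun acc c hc => by
    show pvStep acc c = pvStepL acc _
    rw [pre_all hpre.2 c hc]
    rfl)
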